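-- pv_equiv track=rewrite | github.com/maantano/Coding-Test | 2023.11.21 디스크 컨트롤러_프로그래머스_LV3.py | solution
-- ===== SOURCE A (Python) =====
-- import heapq
-- import heapq
--
-- def solution(jobs):
-- 	answer = []
-- 	l = len(jobs)
-- 	q = []
-- 	jobs.sort(key=lambda x: x[1]-x[0])
-- 	heapq.heappush(q,jobs[0][1]-jobs[0][0])
-- 	answer.append(jobs[0][1]-jobs[0][0])
-- 	for i in range(1,l):
-- 		n1 = heapq.heappop(q)
-- 		answer.append(n1 + jobs[i][1]-jobs[i][0]+jobs[i-1][0])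
-- 		heapq.heappush(q,(n1 + jobs[i][1]-jobs[i][0]))
--
-- 	return sum(answer) // len(answer)
-- ===== SOURCE B (Python) =====
-- def solution(jobs):
--     jobs.sort(key=lambda x: x[1] - x[0])
--     l = len(jobs)
--     total = sum((jobs[i][1] - jobs[i][0]) * (l - i) for i in range(l))
--     total += sum(jobs[i][0] for i in range(l - 1))
--     return total // l
-- ===== Notes on version B (the rewrite author's own statement) =====
-- stated objective: simpler
-- what changed: B keeps A's sort by duration but replaces the heap push/pop loop and the accumulated answer list with a direct closed-form sum: each duration weighted by the number of jobs from its position on, plus all start times except the last, divided by the job count.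
import Mathlib
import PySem

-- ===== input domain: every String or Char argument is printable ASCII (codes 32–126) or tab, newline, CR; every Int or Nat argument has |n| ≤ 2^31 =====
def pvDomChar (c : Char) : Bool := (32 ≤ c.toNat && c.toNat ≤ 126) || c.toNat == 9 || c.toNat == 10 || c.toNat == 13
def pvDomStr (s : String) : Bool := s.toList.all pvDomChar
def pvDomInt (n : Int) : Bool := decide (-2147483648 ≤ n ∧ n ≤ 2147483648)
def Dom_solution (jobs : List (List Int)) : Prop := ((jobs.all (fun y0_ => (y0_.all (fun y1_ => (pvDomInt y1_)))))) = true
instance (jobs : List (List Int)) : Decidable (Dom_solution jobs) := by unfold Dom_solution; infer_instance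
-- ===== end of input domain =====

-- B replaces A's heap-and-accumulator pass with a closed-form weighted sum over the same
-- sorted list (simpler); return-value equivalence only: A sorts `jobs` in place, B does too.

-- ===== PORT A =====
-- heapq modelled as a list kept sorted: heappush = orderedInsert, heappop = (head, tail);
-- Python's key x[1]-x[0] indexes lists of length ≥ 2 (Pre_); getD is exact there.
def solution (jobs : List (List Int)) : Int :=
  let l := jobs.length
  let js := PySem.List.sorted jobs (fun x => x.getD 1 0 - x.getD 0 0)
  let g := fun (i j : Nat) => (js.getD i []).getD j 0
  let d0 := g 0 1 - g 0 0
  let st := (List.range (l - 1)).foldl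
    (fun (st : List Int × List Int) k =>
      let i := k + 1
      let n1 := st.1.headD 0
      let a := n1 + (g i 1 - g i 0) + g (i - 1) 0
      (List.orderedInsert (· ≤ ·) (n1 + (g i 1 - g i 0)) st.1.tail, st.2 ++ [a]))
    ([d0], [d0])
  PySem.Int.floordiv st.2.sum st.2.length

-- ===== PORT B =====
def solution_alt (jobs : List (List Int)) : Int :=
  let js := PySem.List.sorted jobs (fun x => x.getD 1 0 - x.getD 0 0)
  let l := js.length
  let t1 := ((List.range l).map
    (fun i => ((js.getD i []).getD 1 0 - (js.getD i []).getD 0 0) * ((l : Int) - i))).sum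
  let t2 := ((List.range (l - 1)).map (fun i => (js.getD i []).getD 0 0)).sum
  PySem.Int.floordiv (t1 + t2) l

-- ===== PRECONDITION & SPEC =====
-- Pre_ excludes exactly the inputs where the Python A raises: the empty list (IndexError at
-- jobs[0]) and any job of length < 2 (IndexError in the sort key); B raises on those too.
def Pre_solution (jobs : List (List Int)) : Prop :=
  jobs ≠ [] ∧ ∀ x ∈ jobs, 2 ≤ x.length
instance (jobs : List (List Int)) : Decidable (Pre_solution jobs) := by
  unfold Pre_solution; infer_instance

def pvWitness_solution : List (List Int) := [[0, 3], [1, 9], [2, 6]]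

def Spec_solution (jobs : List (List Int)) (out : Int) : Prop := out = solution_alt jobs
instance (jobs : List (List Int)) (out : Int) : Decidable (Spec_solution jobs out) := by
  unfold Spec_solution; infer_instance

-- ===== CLAIM (what is proved, stated in full; the proofs are below) =====
def Claim_equal_solution : Prop := ∀ (jobs : List (List Int)), Dom_solution jobs → Pre_solution jobs → Spec_solution jobs (solution jobs)

-- ===== LEMMAS AND PROOFS =====

-- prefix sum of durations of js up to index m (exclusive)
def pvD (js : List (List Int)) (m : Nat) : Int :=
  ((List.range m).map (fun i => (js.getD i []).getD 1 0 - (js.getD i []).getD 0 0)).sum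

-- the fold in port A, named so the invariant can be stated
def pvStep (js : List (List Int)) (st : List Int × List Int) (k : Nat) : List Int × List Int :=
  let g := fun (i j : Nat) => (js.getD i []).getD j 0
  let i := k + 1
  let n1 := st.1.headD 0
  let a := n1 + (g i 1 - g i 0) + g (i - 1) 0
  (List.orderedInsert (· ≤ ·) (n1 + (g i 1 - g i 0)) st.1.tail, st.2 ++ [a])

theorem pvInv (js : List (List Int)) (n : Nat) :
    (List.range n).foldl (pvStep js) ([pvD js 1], [pvD js 1]) =
      ([pvD js (n + 1)],
        pvD js 1 :: (List.range n).map
          (fun m => pvD js (m + 2) + (js.getD m []).getD 0 0)) := by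
  induction n with
  | zero => simp
  | succ n ih =>
      rw [List.range_succ, List.foldl_append, ih]
      have hD : pvD js (n + 1) + ((js.getD (n+1) []).getD 1 0 - (js.getD (n+1) []).getD 0 0)
          = pvD js (n + 2) := by
        simp [pvD, List.range_succ]
        ring
      simp only [List.foldl_cons, List.foldl_nil, pvStep, List.headD, List.tail,
        List.orderedInsert, List.map_append, List.map_cons, List.map_nil,
        Nat.add_sub_cancel, hD, Prod.mk.injEq]
      refine ⟨by norm_num, ?_⟩
      simp

theorem pvSumD (js : List (List Int)) (l : Nat) :
    ((List.range l).map (fun m => pvD js (m + 1))).sum =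
      ((List.range l).map
        (fun i => ((js.getD i []).getD 1 0 - (js.getD i []).getD 0 0) * ((l : Int) - i))).sum := by
  induction l with
  | zero => simp
  | succ l ih =>
      rw [List.range_succ, List.map_append, List.map_append, List.sum_append, List.sum_append, ih]
      simp only [List.map_cons, List.map_nil, List.sum_cons, List.sum_nil, add_zero]
      have h1 : pvD js (l + 1)
          = ((List.range l).map (fun i => (js.getD i []).getD 1 0 - (js.getD i []).getD 0 0)).sum
            + ((js.getD l []).getD 1 0 - (js.getD l []).getD 0 0) := by
        simp [pvD, List.range_succ]
      rw [h1]
      have h2 : ∀ (f g : Nat → Int) (xs : List Nat),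
          (xs.map f).sum + (xs.map g).sum = (xs.map (fun i => f i + g i)).sum := by
        intro f g xs
        induction xs with
        | nil => simp
        | cons x xs ih2 => simp [← ih2]; ring
      have key : ((List.range l).map
            (fun i => ((js.getD i []).getD 1 0 - (js.getD i []).getD 0 0) * ((l : Int) - i))).sum
          + ((List.range l).map (fun i => (js.getD i []).getD 1 0 - (js.getD i []).getD 0 0)).sum
          = ((List.range l).map
            (fun i => ((js.getD i []).getD 1 0 - (js.getD i []).getD 0 0) * (((l : Int) + 1) - i))).sum := by
        rw [h2]
        apply congrArg
        apply List.map_congr_left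
        intro i _
        ring
      push_cast
      rw [← key]
      ring

-- ===== VERDICT (by name: the statement is the Claim_ definition above) =====
theorem solution_spec : Claim_equal_solution := by
  intro jobs _ hpre
  unfold Spec_solution solution solution_alt
  obtain ⟨hne, _⟩ := hpre
  set js := PySem.List.sorted jobs (fun x => x.getD 1 0 - x.getD 0 0) with hjs
  have hlen : js.length = jobs.length := PySem.List.length_sorted ..
  have hjne : js ≠ [] := by
    rw [hjs, Ne, PySem.List.sorted_eq_nil_iff]; exact hne
  have hpos : 1 ≤ jobs.length := by
    cases jobs with
    | nil => exact absurd rfl hne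
    | cons a as => simp
  simp only [← hlen]
  have hd0 : (js.getD 0 []).getD 1 0 - (js.getD 0 []).getD 0 0 = pvD js 1 := by
    simp [pvD]
  rw [hd0]
  have hfold := pvInv js (js.length - 1)
  have hstep : (fun (st : List Int × List Int) k =>
      let i := k + 1
      let n1 := st.1.headD 0
      let a := n1 + ((js.getD i []).getD 1 0 - (js.getD i []).getD 0 0) + (js.getD (i - 1) []).getD 0 0
      (List.orderedInsert (· ≤ ·) (n1 + ((js.getD i []).getD 1 0 - (js.getD i []).getD 0 0)) st.1.tail,
        st.2 ++ [a])) = pvStep js := by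
    funext st k; simp [pvStep]
  rw [hstep, hfold]
  have hl1 : js.length - 1 + 1 = js.length := by omega
  simp only [List.sum_cons, List.length_cons, List.length_map, List.length_range, hl1]
  have hsplit : ((List.range (js.length - 1)).map
        (fun m => pvD js (m + 2) + (js.getD m []).getD 0 0)).sum
      = ((List.range (js.length - 1)).map (fun m => pvD js (m + 2))).sum
        + ((List.range (js.length - 1)).map (fun m => (js.getD m []).getD 0 0)).sum := by
    induction (List.range (js.length - 1)) with
    | nil => simp
    | cons x xs ih => simp only [List.map_cons, List.sum_cons, ih]; ring
  rw [hsplit]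
  have hshift : pvD js 1 + ((List.range (js.length - 1)).map (fun m => pvD js (m + 2))).sum
      = ((List.range js.length).map (fun m => pvD js (m + 1))).sum := by
    have h : js.length = (js.length - 1) + 1 := by omega
    rw [h, List.range_succ_eq_map, List.map_cons, List.sum_cons, List.map_map]
    congr 1
  rw [← add_assoc, hshift, pvSumD]
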